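-- pv_equiv track=rewrite | github.com/gridgrok-collab/XLChek | sheetguard/detectors/constants.py | _enclosing_function
-- ===== SOURCE A (Python) =====
-- def _enclosing_function(formula: str, pos: int) -> str:
--     """Best-effort: find the function name whose parentheses enclose pos."""
--     # Walk left, track paren depth, pick the nearest NAME( that opens the current depth.
--     s = formula
--     depth = 0
--     i = pos
--     while i >= 0:
--         ch = s[i]
--         if ch == ")":
--             depth += 1
--         elif ch == "(":
--             if depth == 0:
--                 # Extract function name immediately before this '(' (letters + dots/underscores)
--                 j = i - 1
--                 while j >= 0 and (s[j].isalpha() or s[j] in "._"):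
--                     j -= 1
--                 name = s[j + 1 : i].strip()
--                 return name.upper()
--             depth -= 1
--         i -= 1
--     return ""
-- ===== SOURCE B (Python) =====
-- def _name_before(s: str, i: int) -> str:
--     """Maximal run of letters/dots/underscores ending just before index i."""
--     j = i - 1
--     while j >= 0 and (s[j].isalpha() or s[j] in "._"):
--         j -= 1
--     return s[j + 1 : i]
--
--
-- def _enclosing_function(formula: str, pos: int) -> str:
--     # Forward single pass: keep a stack of names of currently-open '('.
--     stack = []
--     for i in range(pos + 1):
--         ch = formula[i]
--         if ch == "(":
--             stack.append(_name_before(formula, i))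
--         elif ch == ")":
--             if stack:
--                 stack.pop()
--     return (stack[-1] if stack else "").strip().upper()
-- ===== Notes on version B (the rewrite author's own statement) =====
-- stated objective: alternative
-- what changed: Replaced the backward walk with a depth counter and early return by a single forward left-to-right pass that maintains a stack of names of currently-open '(' and reads the answer off the top of the stack.
import Mathlib
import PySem

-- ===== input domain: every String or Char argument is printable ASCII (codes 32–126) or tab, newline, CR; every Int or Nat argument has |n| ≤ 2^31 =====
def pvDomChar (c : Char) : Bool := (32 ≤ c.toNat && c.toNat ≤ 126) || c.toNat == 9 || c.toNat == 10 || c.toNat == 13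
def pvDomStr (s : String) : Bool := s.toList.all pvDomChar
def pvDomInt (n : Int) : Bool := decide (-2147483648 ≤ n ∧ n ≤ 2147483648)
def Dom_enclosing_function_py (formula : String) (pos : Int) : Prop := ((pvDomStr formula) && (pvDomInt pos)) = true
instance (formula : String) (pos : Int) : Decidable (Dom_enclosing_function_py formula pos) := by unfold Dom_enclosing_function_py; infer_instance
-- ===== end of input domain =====

-- B replaces A's backward depth-counter scan by a forward pass with a stack of open-paren names (alternative algorithm, same cost).

-- shared char class: s[j].isalpha() or s[j] in "._"
def pvNameChar (c : Char) : Bool := PySem.Chars.isalpha c || c == '.' || c == '_'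

-- ===== PORT A =====
-- the inner j-walk of A: the chars s[j+1:i] where j walks down while name chars hold
def pvNameBefore (s : List Char) : Nat → List Char
  | 0 => []
  | k+1 => if pvNameChar (s.getD k ' ') then pvNameBefore s k ++ [s.getD k ' '] else []

-- the 'while i >= 0' loop of A, i counted down (i is the current index; depth as in A)
def pvALoop (s : List Char) : Nat → Int → String
  | 0, depth =>
    if s.getD 0 ' ' = ')' then ""
    else if s.getD 0 ' ' = '(' then
      (if depth = 0 then String.mk (PySem.Chars.upper (PySem.Chars.strip (pvNameBefore s 0))) else "")
    else ""
  | (k+1), depth =>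
    if s.getD (k+1) ' ' = ')' then pvALoop s k (depth+1)
    else if s.getD (k+1) ' ' = '(' then
      (if depth = 0 then String.mk (PySem.Chars.upper (PySem.Chars.strip (pvNameBefore s (k+1))))
       else pvALoop s k (depth-1))
    else pvALoop s k depth

def enclosing_function_py (formula : String) (pos : Int) : String :=
  if pos < 0 then "" else pvALoop formula.toList pos.toNat 0

-- ===== PORT B =====
-- stack of names after processing formula[0:n] (Source B's 'for i in range(pos+1)' loop state)
def pvBStack (s : List Char) : Nat → List (List Char)
  | 0 => []
  | k+1 =>
    let st := pvBStack s k
    let ch := s.getD k ' '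
    if ch = '(' then st ++ [pvNameBefore s k]
    else if ch = ')' then (if st.isEmpty then st else st.dropLast)
    else st

def enclosing_function_py_alt (formula : String) (pos : Int) : String :=
  let n : Nat := if pos < 0 then 0 else pos.toNat + 1
  let st := pvBStack formula.toList n
  String.mk (PySem.Chars.upper (PySem.Chars.strip ((st.getLast?).getD [])))

-- ===== PRECONDITION & SPEC =====
-- A indexes s[pos] (and a negative pos never enters the loop), so A raises IndexError exactly when pos ≥ len(formula); Pre_ excludes only that.
def Pre_enclosing_function_py (formula : String) (pos : Int) : Prop := pos < (formula.toList.length : Int)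
instance (formula : String) (pos : Int) : Decidable (Pre_enclosing_function_py formula pos) := by unfold Pre_enclosing_function_py; infer_instance
def pvWitness_enclosing_function_py : String × Int := ("SUM(A1)", 5)

def Spec_enclosing_function_py (formula : String) (pos : Int) (out : String) : Prop := out = enclosing_function_py_alt formula pos
instance (formula : String) (pos : Int) (out : String) : Decidable (Spec_enclosing_function_py formula pos out) := by unfold Spec_enclosing_function_py; infer_instance

-- ===== CLAIM (what is proved, stated in full; the proofs are below) =====
def Claim_equal_enclosing_function_py : Prop := ∀ (formula : String) (pos : Int), Dom_enclosing_function_py formula pos → Pre_enclosing_function_py formula pos → Spec_enclosing_function_py formula pos (enclosing_function_py formula pos)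

-- ===== LEMMAS AND PROOFS =====

-- output shaping shared by both sides
def pvOut (o : Option (List Char)) : String :=
  String.mk (PySem.Chars.upper (PySem.Chars.strip (o.getD [])))

lemma pvOut_none : pvOut none = "" := by decide

lemma dropLast_reverse (l : List (List Char)) : l.dropLast.reverse = l.reverse.tail := by
  induction l using List.reverseRecOn with
  | nil => rfl
  | append_singleton xs x ih => simp

lemma pvBStack_succ (s : List Char) (k : Nat) :
    pvBStack s (k+1) =
      (if s.getD k ' ' = '(' then pvBStack s k ++ [pvNameBefore s k]
       else if s.getD k ' ' = ')' then
         (if (pvBStack s k).isEmpty then pvBStack s k else (pvBStack s k).dropLast)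
       else pvBStack s k) := rfl

-- key invariant: A's backward scan at index i with depth d reads the d-th-from-top
-- element of B's stack after the prefix [0..i].
lemma pvKey (s : List Char) (i : Nat) (d : Nat) :
    pvALoop s i (d : Int) = pvOut ((pvBStack s (i+1)).reverse[d]?) := by
  induction i generalizing d with
  | zero =>
    rw [pvALoop, pvBStack_succ]
    by_cases h1 : s.getD 0 ' ' = ')'
    · have hne : ¬ s.getD 0 ' ' = '(' := by rw [h1]; decide
      rw [if_pos h1, if_neg hne, if_pos h1]
      simp [pvBStack, pvOut_none]
    · by_cases h2 : s.getD 0 ' ' = '('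
      · rw [if_neg h1, if_pos h2, if_pos h2]
        by_cases hd : d = 0
        · subst hd; simp [pvBStack, pvOut]
        · rw [if_neg (by exact_mod_cast hd)]
          simp [pvBStack, hd, pvOut_none]
      · rw [if_neg h1, if_neg h2, if_neg h2, if_neg h1]
        simp [pvBStack, pvOut_none]
  | succ k ih =>
    rw [pvALoop, pvBStack_succ s (k+1)]
    by_cases h1 : s.getD (k+1) ' ' = ')'
    · have hne : ¬ s.getD (k+1) ' ' = '(' := by rw [h1]; decide
      rw [if_pos h1, if_neg hne, if_pos h1]
      have hih := ih (d+1)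
      push_cast at hih
      rw [hih]
      by_cases he : (pvBStack s (k+1)).isEmpty
      · rw [if_pos he, List.isEmpty_iff.mp he]; simp [pvOut_none]
      · rw [if_neg he, dropLast_reverse, List.getElem?_tail]
    · by_cases h2 : s.getD (k+1) ' ' = '('
      · rw [if_neg h1, if_pos h2, if_pos h2]
        by_cases hd : d = 0
        · subst hd
          simp [pvOut]
        · rw [if_neg (by exact_mod_cast hd)]
          obtain ⟨d', rfl⟩ := Nat.exists_eq_succ_of_ne_zero hd
          have hcast : ((d' + 1 : Nat) : Int) - 1 = (d' : Int) := by push_cast; ring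
          rw [hcast, ih d']
          simp
      · rw [if_neg h1, if_neg h2, if_neg h2, if_neg h1, ih d]

lemma getElem?_zero_reverse (l : List (List Char)) : l.reverse[0]? = l.getLast? := by
  cases l using List.reverseRecOn <;> simp

-- ===== VERDICT (by name: the statement is the Claim_ definition above) =====
theorem enclosing_function_py_spec : Claim_equal_enclosing_function_py := by
  intro formula pos _ _
  unfold Spec_enclosing_function_py enclosing_function_py enclosing_function_py_alt
  by_cases h : pos < 0
  · simp only [h, if_true]
    rfl
  · simp only [h, if_false]
    have h0 := pvKey formula.toList pos.toNat 0
    rw [Nat.cast_zero] at h0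
    rw [h0, getElem?_zero_reverse]
    rfl
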